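-- pv_equiv track=rewrite | github.com/oreolic/SGE_EGFR | Codes/ed_seq.py | n_mm_barcode
-- ===== SOURCE A (Python) =====
-- from itertools import combinations
--
-- def _change_mm_num_to_nt(i,j,mm_bc_dic,bc,mmdic):
--     wt_nt = bc[j]
--     mm_nt_lst = mmdic[wt_nt]
--
--     new_dic = {}
--     for mmbcs in mm_bc_dic:
--         for mm_nt in mm_nt_lst:
--             ed_bc = mmbcs.replace(str(i),mm_nt)
--             new_dic[ed_bc] = bc
--
--     new_dic
--     return new_dic
--
-- def _generate_mm_bc(sb,n):
--     poslst = [i for i in range(len(sb))]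
--     mm_comb = list(combinations(poslst,n))
--     mmdic = {'A':['T','G','C'],'T':['A','G','C'],'G':['A','T','C'],'C':['A','T','G']}
--
--     final_dic = {sb:sb}
--
--     for tup in mm_comb:
--         mmbc = ''
--
--         m = 0
--         for idx,nt in enumerate(sb): ## mmbc : TGT0TCTTTC1CGTATAC
--             if idx in tup:
--                 mmbc += str(m)
--                 m += 1
--             else:
--                 mmbc += nt
--
--         mm_bc_dic = {mmbc:1}
--         for i,j in enumerate(tup):
--             mm_bc_dic = _change_mm_num_to_nt(i,j,mm_bc_dic,sb,mmdic)
--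
--         for mm_ed_bc in mm_bc_dic:
--             final_dic[mm_ed_bc] = sb
--     return final_dic
--
-- def n_mm_barcode(sb,n):
--     if n == 0:
--         merged_dic = {sb:sb}
--     else:
--         merged_dic = {}
--
--         for i in range(1,n+1):
--             eachdic = _generate_mm_bc(sb,i)
--             for ed_bc in eachdic:
--                 merged_dic[ed_bc] = sb
--     return merged_dic
-- ===== SOURCE B (Python) =====
-- from itertools import combinations, product
--
-- def n_mm_barcode(sb, n):
--     alts = {'A': 'TGC', 'T': 'AGC', 'G': 'ATC', 'C': 'ATG'}
--     out = {}
--     if n >= 0: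
--         out[sb] = sb
--     for i in range(1, n + 1):
--         for combo in combinations(range(len(sb)), i):
--             for choice in product(*(alts[sb[j]] for j in combo)):
--                 var = list(sb)
--                 for j, c in zip(combo, choice):
--                     var[j] = c
--                 out[''.join(var)] = sb
--     return out
-- ===== Notes on version B (the rewrite author's own statement) =====
-- stated objective: simpler
-- what changed: B drops A's digit-placeholder string and per-digit str.replace cascade of rebuilt dicts: for each mismatch-position combination it takes the cartesian product of the alternative-nucleotide lists and writes the chosen letters directly into a copy of the barcode, inserting each variant into one dict; Pre_ excludes inputs where A raises KeyError (non-ACGT characters with n>=1) and the corner n>=11 with len(sb)>=11 where A's two-character placeholder '10' is torn apart by replace('0',..)/replace('1',..), an accident of the placeholder encoding that yields corrupted length-12 keys.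
-- outside the precondition, e.g. on n_mm_barcode('X', 1): A raises KeyError, B raises KeyError
import Mathlib
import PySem

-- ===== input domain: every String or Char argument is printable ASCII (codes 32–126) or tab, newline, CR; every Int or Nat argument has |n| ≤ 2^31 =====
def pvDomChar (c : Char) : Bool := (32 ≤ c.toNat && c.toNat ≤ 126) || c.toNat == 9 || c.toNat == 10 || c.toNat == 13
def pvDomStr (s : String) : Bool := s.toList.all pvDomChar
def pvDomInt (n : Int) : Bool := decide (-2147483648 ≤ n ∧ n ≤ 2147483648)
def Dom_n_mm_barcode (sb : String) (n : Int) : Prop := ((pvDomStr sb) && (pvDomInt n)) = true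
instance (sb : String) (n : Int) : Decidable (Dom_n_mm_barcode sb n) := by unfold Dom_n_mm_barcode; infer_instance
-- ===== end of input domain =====

-- B replaces A's digit-placeholder/str.replace variant generator by a direct cartesian-product
-- write-out of the substituted positions (objective: simpler, same enumeration order).


-- ===== PORT A =====
-- mmdic = {'A':['T','G','C'],'T':['A','G','C'],'G':['A','T','C'],'C':['A','T','G']}
def pyMmdic : PySem.Dict Char (List Char) :=
  PySem.Dict.ofList
    [('A', ['T','G','C']), ('T', ['A','G','C']), ('G', ['A','T','C']), ('C', ['A','T','G'])]

-- _change_mm_num_to_nt.  Python's mm_bc_dic is heterogeneous ({mmbc:1} then values bc);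
-- its values are never read, so it is ported with value type List Char (the initial int 1
-- becomes the placeholder value ['1'], exact on keys, which alone determine the output).
-- bc[j] : j always comes from a combination of range(len(bc)), so in range (.getD ' ' never hit);
-- mmdic[wt_nt] : KeyError on a non-ACGT character, excluded by Pre_ (ported as getD []).
def changeMmNumToNt (i : Int) (j : Int) (mm_bc_dic : PySem.Dict (List Char) (List Char))
    (bc : List Char) (mmdic : PySem.Dict Char (List Char)) : PySem.Dict (List Char) (List Char) :=
  let wt_nt : Char := (PySem.List.pyGet? bc j).getD ' '
  let mm_nt_lst : List Char := mmdic.getD wt_nt []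
  mm_bc_dic.keys.foldl
    (fun new_dic mmbcs =>
      mm_nt_lst.foldl
        (fun new_dic mm_nt =>
          new_dic.insert (PySem.Chars.replace mmbcs (PySem.Int.toStr i).toList [mm_nt]) bc)
        new_dic)
    PySem.Dict.empty

-- _generate_mm_bc (n ≥ 1 at every call site, so combinations gets n.toNat = n)
def generateMmBc (sb : List Char) (n : Int) : PySem.Dict (List Char) (List Char) :=
  let poslst : List Int := PySem.List.pyRange 0 sb.length
  let mm_comb : List (List Int) := PySem.List.combinations poslst n.toNat
  let final_dic : PySem.Dict (List Char) (List Char) := PySem.Dict.empty.insert sb sb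
  mm_comb.foldl
    (fun final_dic tup =>
      let st := (PySem.List.enumerate sb).foldl
        (fun (st : List Char × Int) p =>
          if tup.contains p.1 then (st.1 ++ (PySem.Int.toStr st.2).toList, st.2 + 1)
          else (st.1 ++ [p.2], st.2))
        (([] : List Char), (0 : Int))
      let mmbc := st.1
      let mm_bc_dic0 : PySem.Dict (List Char) (List Char) := PySem.Dict.empty.insert mmbc ['1']
      let mm_bc_dic := (PySem.List.enumerate tup).foldl
        (fun d p => changeMmNumToNt p.1 p.2 d sb pyMmdic) mm_bc_dic0
      mm_bc_dic.keys.foldl (fun fd k => fd.insert k sb) final_dic)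
    final_dic

def n_mm_barcode (sb : String) (n : Int) : List (String × String) :=
  if n = 0 then
    ((PySem.Dict.empty.insert sb.toList sb.toList : PySem.Dict (List Char) (List Char))).items.map
      (fun p => (String.ofList p.1, String.ofList p.2))
  else
    let merged := (PySem.List.pyRange 1 (n+1)).foldl
      (fun (merged : PySem.Dict (List Char) (List Char)) i =>
        (generateMmBc sb.toList i).keys.foldl (fun m k => m.insert k sb.toList) merged)
      PySem.Dict.empty
    merged.items.map (fun p => (String.ofList p.1, String.ofList p.2))

-- ===== PORT B =====
-- alts = {'A':'TGC','T':'AGC','G':'ATC','C':'ATG'}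
def pyAlts : PySem.Dict Char (List Char) :=
  PySem.Dict.ofList
    [('A', "TGC".toList), ('T', "AGC".toList), ('G', "ATC".toList), ('C', "ATG".toList)]

-- itertools.product over a list of factor lists, in CPython's order (rightmost varies fastest)
def pyProduct {α : Type} : List (List α) → List (List α)
  | [] => [[]]
  | l :: ls => l.flatMap (fun x => (pyProduct ls).map (fun t => x :: t))

-- Source B: alts[sb[j]] raises KeyError on a non-ACGT character (excluded by Pre_, ported as getD []);
-- j is drawn from a combination of range(len(sb)), so sb[j] is in range.
def n_mm_barcode_alt (sb : String) (n : Int) : List (String × String) :=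
  let s := sb.toList
  let out0 : PySem.Dict (List Char) (List Char) :=
    if 0 ≤ n then PySem.Dict.empty.insert s s else PySem.Dict.empty
  let out := (PySem.List.pyRange 1 (n+1)).foldl
    (fun (out : PySem.Dict (List Char) (List Char)) i =>
      (PySem.List.combinations (PySem.List.pyRange 0 s.length) i.toNat).foldl
        (fun out combo =>
          (pyProduct (combo.map (fun j => pyAlts.getD ((PySem.List.pyGet? s j).getD ' ') []))).foldl
            (fun out choice =>
              let var := (combo.zip choice).foldl (fun v p => PySem.List.pySetD v p.1 p.2) s
              out.insert var s)
            out)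
        out)
    out0
  out.items.map (fun p => (String.ofList p.1, String.ofList p.2))

-- ===== PRECONDITION & SPEC =====
-- Pre_ excludes (1) inputs where A raises KeyError (n ≥ 1 with a character outside ACGT: mmdic[wt_nt]),
-- and (2) the corner n ≥ 11 ∧ len(sb) ≥ 11, where A still returns but its two-character placeholder
-- str(10) is torn apart by .replace('0',..)/.replace('1',..), an accident of the placeholder encoding
-- that yields corrupted length-12 keys no direct enumeration can share.
def Pre_n_mm_barcode (sb : String) (n : Int) : Prop :=
  (1 ≤ n → ∀ c ∈ sb.toList, c ∈ (['A','T','G','C'] : List Char)) ∧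
  ¬(11 ≤ n ∧ 11 ≤ sb.toList.length)
instance (sb : String) (n : Int) : Decidable (Pre_n_mm_barcode sb n) := by
  unfold Pre_n_mm_barcode; infer_instance

def pvWitness_n_mm_barcode : String × Int := ("ATG", 0)

def Spec_n_mm_barcode (sb : String) (n : Int) (out : List (String × String)) : Prop :=
  out = n_mm_barcode_alt sb n
instance (sb : String) (n : Int) (out : List (String × String)) :
    Decidable (Spec_n_mm_barcode sb n out) := by unfold Spec_n_mm_barcode; infer_instance

-- ===== CLAIM (what is proved, stated in full; the proofs are below) =====
def Claim_equal_n_mm_barcode : Prop := ∀ (sb : String) (n : Int), Dom_n_mm_barcode sb n →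
  Pre_n_mm_barcode sb n → Spec_n_mm_barcode sb n (n_mm_barcode sb n)

-- ===== LEMMAS AND PROOFS =====

abbrev CDict := PySem.Dict (List Char) (List Char)

def insKeys (m : CDict) (v : List Char) (ks : List (List Char)) : CDict :=
  ks.foldl (fun m k => m.insert k v) m

def AllVal (m : CDict) (v : List Char) : Prop := ∀ p ∈ m.items, p.2 = v

theorem insKeys_append (m : CDict) (v : List Char) (a b : List (List Char)) :
    insKeys m v (a ++ b) = insKeys (insKeys m v a) v b := List.foldl_append ..

theorem allVal_insert {m : CDict} {v : List Char} (h : AllVal m v) (k : List Char) :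
    AllVal (m.insert k v) v := by
  intro p hp
  unfold PySem.Dict.insert at hp
  split at hp
  · simp only [List.mem_map] at hp
    obtain ⟨q, hq, rfl⟩ := hp
    split
    · rfl
    · exact h q hq
  · simp only [List.mem_append, List.mem_singleton] at hp
    rcases hp with hp | rfl
    · exact h p hp
    · rfl

theorem allVal_insKeys {m : CDict} {v : List Char} (h : AllVal m v) (ks : List (List Char)) :
    AllVal (insKeys m v ks) v := by
  induction ks generalizing m with
  | nil => exact h
  | cons k ks ih => exact ih (allVal_insert h k)

theorem insert_self {m : CDict} {v : List Char} (h : AllVal m v) {k : List Char}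
    (hc : m.contains k = true) : m.insert k v = m := by
  apply PySem.Dict.ext
  unfold PySem.Dict.insert
  rw [if_pos hc]
  show List.map _ m.items = m.items
  conv_rhs => rw [← List.map_id m.items]
  apply List.map_congr_left
  intro p hp
  split
  · next hbeq =>
      have : p.1 = k := by simpa using hbeq
      have h2 := h p hp
      cases p; simp_all
  · simp

theorem keys_insKeys (m : CDict) (v : List Char) (ks : List (List Char)) :
    (insKeys m v ks).keys = PySem.Set.update m.keys ks :=
  PySem.Dict.keys_foldl_insert ks (fun _ _ => v) m

theorem contains_insKeys_of_mem {k : List Char} {ks : List (List Char)} (m : CDict)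
    (v : List Char) (h : k ∈ ks) : (insKeys m v ks).contains k = true := by
  rw [PySem.Dict.contains_iff_mem_keys, keys_insKeys, PySem.Set.mem_update]
  exact Or.inr h

theorem contains_insKeys_mono {k : List Char} {m : CDict} (v : List Char)
    (ks : List (List Char)) (h : m.contains k = true) :
    (insKeys m v ks).contains k = true := by
  rw [PySem.Dict.contains_iff_mem_keys, keys_insKeys, PySem.Set.mem_update]
  exact Or.inl ((PySem.Dict.contains_iff_mem_keys m k).1 h)

theorem insKeys_of_contains {m : CDict} {v : List Char} (h : AllVal m v)
    {ks : List (List Char)} (hc : ∀ k ∈ ks, m.contains k = true) : insKeys m v ks = m := by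
  induction ks with
  | nil => rfl
  | cons k ks ih =>
      show insKeys (m.insert k v) v ks = m
      rw [insert_self h (hc k (List.mem_cons_self))]
      exact ih (fun k' hk' => hc k' (List.mem_cons_of_mem _ hk'))

theorem insKeys_update_flatMap (v : List Char) (f : List Char → List (List Char)) :
    ∀ (X seen : List (List Char)) (m : CDict), AllVal m v →
    insKeys m v ((PySem.Set.update seen X).flatMap f) = insKeys m v ((seen ++ X).flatMap f) := by
  intro X
  induction X with
  | nil => intro seen m _; simp [PySem.Set.update]
  | cons x X ih =>
      intro seen m hm
      have hstep : PySem.Set.update seen (x :: X) = PySem.Set.update (PySem.Set.add seen x) X := by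
        simp [PySem.Set.update]
      rw [hstep]
      by_cases hxm : x ∈ seen
      · have hadd : PySem.Set.add seen x = seen := by simp [PySem.Set.add, hxm]
        rw [hadd, ih seen m hm]
        have hsplit : (seen ++ x :: X) = (seen ++ [x]) ++ X := by simp
        have key : insKeys (insKeys m v (seen.flatMap f)) v ([x].flatMap f)
            = insKeys m v (seen.flatMap f) := by
          apply insKeys_of_contains (allVal_insKeys hm _)
          intro k hk
          simp only [List.flatMap_cons, List.flatMap_nil, List.append_nil] at hk
          apply contains_insKeys_of_mem
          exact List.mem_flatMap.2 ⟨x, hxm, hk⟩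
        calc insKeys m v ((seen ++ X).flatMap f)
            = insKeys (insKeys m v (seen.flatMap f)) v (X.flatMap f) := by
              rw [List.flatMap_append, insKeys_append]
          _ = insKeys (insKeys (insKeys m v (seen.flatMap f)) v ([x].flatMap f)) v
                (X.flatMap f) := by rw [key]
          _ = insKeys m v ((seen ++ x :: X).flatMap f) := by
              rw [hsplit, List.flatMap_append, List.flatMap_append, insKeys_append, insKeys_append]
      · have hadd : PySem.Set.add seen x = seen ++ [x] := by simp [PySem.Set.add, hxm]
        rw [hadd, ih (seen ++ [x]) m hm]
        congr 2
        simp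

theorem insKeys_update (v : List Char) (X seen : List (List Char)) (m : CDict)
    (hm : AllVal m v) :
    insKeys m v (PySem.Set.update seen X) = insKeys m v (seen ++ X) := by
  have h := insKeys_update_flatMap v (fun y => [y]) X seen m hm
  simpa using h

def NTS : List Char := ['A','T','G','C']
def digitC (m : Int) : Char := Char.ofNat (48 + m.toNat)

theorem toStr_digit (k : Int) (h0 : 0 ≤ k) (h9 : k ≤ 9) :
    (PySem.Int.toStr k).toList = [digitC k] := by
  interval_cases k <;> decide

theorem digitC_toNat (k : Int) (h0 : 0 ≤ k) (h9 : k ≤ 9) : (digitC k).toNat = 48 + k.toNat := by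
  interval_cases k <;> decide

theorem digitC_inj {a b : Int} (ha0 : 0 ≤ a) (ha9 : a ≤ 9) (hb0 : 0 ≤ b) (hb9 : b ≤ 9)
    (h : digitC a = digitC b) : a = b := by
  have := congrArg Char.toNat h
  rw [digitC_toNat a ha0 ha9, digitC_toNat b hb0 hb9] at this
  omega

theorem digitC_not_NTS {a : Int} (ha0 : 0 ≤ a) (ha9 : a ≤ 9) : digitC a ∉ NTS := by
  interval_cases a <;> decide

theorem replace_go_no_occ (d c : Char) :
    ∀ (fuel : Nat) (l acc : List Char), l.length ≤ fuel → d ∉ l →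
    PySem.Chars.replace.go [d] [c] fuel l acc = acc.reverse ++ l := by
  intro fuel
  induction fuel with
  | zero =>
      intro l acc hl _
      cases l with
      | nil => simp [PySem.Chars.replace.go]
      | cons x t => simp at hl
  | succ fuel ih =>
      intro l acc hl hd
      cases l with
      | nil => simp [PySem.Chars.replace.go]
      | cons x t =>
          have hx : ¬ ([d].isPrefixOf (x :: t) = true) := by
            simp only [List.isPrefixOf_cons₂ ] at *
            simp only [List.mem_cons] at hd
            intro hcon
            simp at hcon
            exact hd (Or.inl hcon)
          rw [PySem.Chars.replace.go]
          rw [if_neg hx]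
          rw [ih t (x :: acc) (by simpa using Nat.le_of_succ_le_succ (by simpa using hl))
            (fun h => hd (List.mem_cons_of_mem _ h))]
          simp

theorem replace_go_first (d c : Char) :
    ∀ (a : List Char) (b : List Char) (fuel : Nat) (acc : List Char),
    (a ++ d :: b).length ≤ fuel → d ∉ a → d ∉ b →
    PySem.Chars.replace.go [d] [c] fuel (a ++ d :: b) acc = acc.reverse ++ a ++ c :: b := by
  intro a
  induction a with
  | nil =>
      intro b fuel acc hl _ hb
      cases fuel with
      | zero => simp at hl
      | succ fuel =>
          rw [List.nil_append, PySem.Chars.replace.go]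
          have hpre : [d].isPrefixOf (d :: b) = true := by simp [List.isPrefixOf]
          rw [if_pos hpre]
          have : List.drop [d].length (d :: b) = b := by simp
          rw [this]
          rw [replace_go_no_occ d c fuel b ([c].reverse ++ acc) (by simp at hl; omega) hb]
          simp
  | cons x a ih =>
      intro b fuel acc hl hxa hb
      have hxd : x ≠ d := fun h => hxa (h ▸ List.mem_cons_self)
      cases fuel with
      | zero => simp at hl
      | succ fuel =>
          rw [List.cons_append, PySem.Chars.replace.go]
          have hpre : ¬ ([d].isPrefixOf (x :: (a ++ d :: b)) = true) := by
            simp [List.isPrefixOf]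
            exact fun h => hxd h.symm
          rw [if_neg hpre]
          rw [ih b fuel (x :: acc) (by simp at hl ⊢; omega)
            (fun h => hxa (List.mem_cons_of_mem _ h)) hb]
          simp

theorem replace_single (u : List Char) (d c : Char) (p : Nat) (hp : p < u.length)
    (hd : u.getD p ' ' = d) (huniq : ∀ q : Nat, q < u.length → q ≠ p → u.getD q ' ' ≠ d) :
    PySem.Chars.replace u [d] [c] = u.set p c := by
  have hu : u = u.take p ++ d :: u.drop (p + 1) := by
    conv_lhs => rw [← List.take_append_drop p u]
    congr 1
    rw [List.drop_eq_getElem_cons hp]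
    congr 1
    rw [List.getD_eq_getElem u ' ' hp] at hd
    exact hd
  have hta : d ∉ u.take p := by
    intro hmem
    obtain ⟨q, hq, hget⟩ := List.mem_iff_getElem.1 hmem
    have hqlt : q < p := by simpa using (hq.trans_le (List.length_take_le p u))
    have hq2 : q < u.length := lt_trans hqlt hp
    apply huniq q hq2 (Nat.ne_of_lt hqlt)
    rw [List.getD_eq_getElem u ' ' hq2, ← List.getElem_take]
    exact hget
  have hdb : d ∉ u.drop (p + 1) := by
    intro hmem
    obtain ⟨q, hq, hget⟩ := List.mem_iff_getElem.1 hmem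
    rw [List.length_drop] at hq
    have hq2 : p + 1 + q < u.length := by omega
    apply huniq (p + 1 + q) hq2 (by omega)
    rw [List.getD_eq_getElem u ' ' hq2]
    rw [List.getElem_drop] at hget
    exact hget
  rw [PySem.Chars.replace]
  rw [if_neg (by simp)]
  conv_lhs => rw [hu]
  rw [replace_go_first d c (u.take p) (u.drop (p+1)) (u.take p ++ d :: u.drop (p+1)).length []
    (le_refl _) hta hdb]
  rw [List.set_eq_take_append_cons_drop]
  rw [if_pos hp]
  simp

def buildMm (tup : List Int) : List Char → Int → Int → List Char
  | [], _, _ => []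
  | ch :: cs, idx, m =>
      if tup.contains idx then (PySem.Int.toStr m).toList ++ buildMm tup cs (idx+1) (m+1)
      else ch :: buildMm tup cs (idx+1) m

def maddMm (tup : List Int) : List Char → Int → Int → Int
  | [], _, m => m
  | _ :: cs, idx, m =>
      if tup.contains idx then maddMm tup cs (idx+1) (m+1) else maddMm tup cs (idx+1) m

theorem fold_eq_build (tup : List Int) :
    ∀ (cs : List Char) (idx : Int) (a : List Char) (m : Int),
    (PySem.List.enumerate cs idx).foldl
      (fun (st : List Char × Int) p =>
        if tup.contains p.1 then (st.1 ++ (PySem.Int.toStr st.2).toList, st.2 + 1)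
        else (st.1 ++ [p.2], st.2)) (a, m)
    = (a ++ buildMm tup cs idx m, maddMm tup cs idx m) := by
  intro cs
  induction cs with
  | nil => intro idx a m; simp [PySem.List.enumerate, buildMm, maddMm]
  | cons ch cs ih =>
      intro idx a m
      rw [PySem.List.enumerate_cons, List.foldl_cons]
      by_cases h : tup.contains idx = true
      · rw [if_pos h, ih (idx+1) _ (m+1), buildMm, maddMm, if_pos h, if_pos h,
          List.append_assoc]
      · rw [if_neg h, ih (idx+1) _ m, buildMm, maddMm, if_neg h, if_neg h,
          List.append_assoc, List.singleton_append]

theorem madd_mono (tup : List Int) :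
    ∀ (cs : List Char) (idx m : Int), m ≤ maddMm tup cs idx m := by
  intro cs
  induction cs with
  | nil => intro idx m; simp [maddMm]
  | cons ch cs ih =>
      intro idx m
      rw [maddMm]
      split
      · exact le_trans (by omega) (ih (idx+1) (m+1))
      · exact ih (idx+1) m

theorem build_length (tup : List Int) :
    ∀ (cs : List Char) (idx m : Int), 0 ≤ m → maddMm tup cs idx m ≤ 10 →
    (buildMm tup cs idx m).length = cs.length := by
  intro cs
  induction cs with
  | nil => intro idx m _ _; simp [buildMm]
  | cons ch cs ih =>
      intro idx m h0 hb
      rw [buildMm]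
      by_cases h : tup.contains idx = true
      · rw [if_pos h]
        rw [maddMm, if_pos h] at hb
        have h9 : m ≤ 9 := by
          have := madd_mono tup cs (idx+1) (m+1); omega
        rw [toStr_digit m h0 h9]
        simp [ih (idx+1) (m+1) (by omega) hb]
      · rw [if_neg h]
        rw [maddMm, if_neg h] at hb
        simp [ih (idx+1) m h0 hb]

theorem build_getD_off (tup : List Int) :
    ∀ (cs : List Char) (idx m : Int) (p : Nat), 0 ≤ m → maddMm tup cs idx m ≤ 10 →
    p < cs.length → (idx + p) ∉ tup →
    (buildMm tup cs idx m).getD p ' ' = cs.getD p ' ' := by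
  intro cs
  induction cs with
  | nil => intro idx m p _ _ hp _; simp at hp
  | cons ch cs ih =>
      intro idx m p h0 hb hp hnot
      rw [buildMm]
      by_cases h : tup.contains idx = true
      · rw [if_pos h]
        rw [maddMm, if_pos h] at hb
        have h9 : m ≤ 9 := by have := madd_mono tup cs (idx+1) (m+1); omega
        rw [toStr_digit m h0 h9]
        cases p with
        | zero => exact absurd (by simpa using h) (by simpa using hnot)
        | succ q =>
            simp only [List.cons_append, List.nil_append, List.getD_cons_succ, List.getD_cons_succ]
            exact ih (idx+1) (m+1) q (by omega) hb (by simpa using hp)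
              (by intro hc; apply hnot
                  have e : idx + ((q+1 : Nat) : Int) = idx + 1 + (q : Int) := by push_cast; ring
                  rw [e]; exact hc)
      · rw [if_neg h]
        rw [maddMm, if_neg h] at hb
        cases p with
        | zero => simp
        | succ q =>
            simp only [List.getD_cons_succ]
            exact ih (idx+1) m q h0 hb (by simpa using hp)
              (by intro hc; apply hnot
                  have e : idx + ((q+1 : Nat) : Int) = idx + 1 + (q : Int) := by push_cast; ring
                  rw [e]; exact hc)

theorem build_getD_on (tup : List Int) :
    ∀ (cs : List Char) (idx m : Int) (p : Nat), 0 ≤ m → maddMm tup cs idx m ≤ 10 →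
    p < cs.length → (idx + p) ∈ tup →
    (buildMm tup cs idx m).getD p ' ' = digitC (maddMm tup (cs.take p) idx m) := by
  intro cs
  induction cs with
  | nil => intro idx m p _ _ hp _; simp at hp
  | cons ch cs ih =>
      intro idx m p h0 hb hp hmem
      rw [buildMm]
      by_cases h : tup.contains idx = true
      · rw [if_pos h]
        rw [maddMm, if_pos h] at hb
        have h9 : m ≤ 9 := by have := madd_mono tup cs (idx+1) (m+1); omega
        rw [toStr_digit m h0 h9]
        cases p with
        | zero => simp [maddMm]
        | succ q =>
            simp only [List.cons_append, List.nil_append, List.getD_cons_succ]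
            rw [ih (idx+1) (m+1) q (by omega) hb (by simpa using hp)
              (by have e : idx + ((q+1 : Nat) : Int) = idx + 1 + (q : Int) := by push_cast; ring
                  rw [e] at hmem; exact hmem)]
            congr 1
            rw [List.take_succ_cons, maddMm, if_pos h]
      · rw [if_neg h]
        rw [maddMm, if_neg h] at hb
        cases p with
        | zero =>
            exfalso
            apply absurd hmem
            simpa using h
        | succ q =>
            simp only [List.getD_cons_succ]
            rw [ih (idx+1) m q h0 hb (by simpa using hp)
              (by have e : idx + ((q+1 : Nat) : Int) = idx + 1 + (q : Int) := by push_cast; ring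
                  rw [e] at hmem; exact hmem)]
            congr 1
            rw [List.take_succ_cons, maddMm, if_neg h]

theorem countP_or_disjoint {α : Type} (p q r : α → Bool) (l : List α)
    (hpq : ∀ x ∈ l, p x = (q x || r x)) (hdis : ∀ x ∈ l, ¬(q x = true ∧ r x = true)) :
    l.countP p = l.countP q + l.countP r := by
  induction l with
  | nil => simp
  | cons x l ih =>
      have hx := hpq x List.mem_cons_self
      have hd := hdis x List.mem_cons_self
      have ih' := ih (fun y hy => hpq y (List.mem_cons_of_mem _ hy))
        (fun y hy => hdis y (List.mem_cons_of_mem _ hy))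
      cases hq : q x <;> cases hr : r x
      · simp only [List.countP_cons, hx, hq, hr, Bool.or_false, Bool.false_eq_true,
          if_false]
        rw [ih']
        omega
      · simp only [List.countP_cons, hx, hq, hr, Bool.false_or, Bool.false_eq_true,
          if_false, if_true]
        rw [ih']
        omega
      · simp only [List.countP_cons, hx, hq, hr, Bool.or_false, Bool.false_eq_true,
          if_false, if_true]
        rw [ih']
        omega
      · exact absurd ⟨hq, hr⟩ hd

theorem countP_split_at (A B : Int) (l : List Int) :
    l.countP (fun x => decide (A ≤ x ∧ x < B)) =
      l.countP (fun x => decide (x = A ∧ A < B)) +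
      l.countP (fun x => decide (A + 1 ≤ x ∧ x < B)) := by
  apply countP_or_disjoint
  · intro x _
    have hiff : (A ≤ x ∧ x < B) ↔ ((x = A ∧ A < B) ∨ (A + 1 ≤ x ∧ x < B)) := by omega
    rw [decide_eq_decide.mpr hiff]
    exact Bool.decide_or _ _
  · intro x _
    simp only [decide_eq_true_eq]
    omega

theorem countP_eq_singleton (A : Int) (l : List Int) (hnd : l.Nodup) :
    l.countP (fun x => decide (x = A)) = if A ∈ l then 1 else 0 := by
  have : l.countP (fun x => decide (x = A)) = l.count A := by
    rw [List.count_eq_countP]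
    apply List.countP_congr
    intro x _
    simp
  rw [this]
  split
  · exact List.count_eq_one_of_mem hnd ‹A ∈ l›
  · exact List.count_eq_zero_of_not_mem ‹A ∉ l›

theorem madd_eq_countP (tup : List Int) (hnd : tup.Nodup) :
    ∀ (cs : List Char) (idx m : Int),
    maddMm tup cs idx m
      = m + (tup.countP (fun j => decide (idx ≤ j ∧ j < idx + cs.length))) := by
  intro cs
  induction cs with
  | nil =>
      intro idx m
      rw [maddMm]
      have : tup.countP (fun j => decide (idx ≤ j ∧ j < idx + ([] : List Char).length)) = 0 := by
        apply List.countP_eq_zero.mpr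
        intro j _
        simp only [List.length_nil, Nat.cast_zero, add_zero, decide_eq_true_eq]
        omega
      omega
  | cons ch cs ih =>
      intro idx m
      have hsplit := countP_split_at idx (idx + ((ch :: cs).length : Int)) tup
      have hcongr : tup.countP (fun x => decide (x = idx ∧ idx < idx + ((ch :: cs).length : Int)))
          = tup.countP (fun x => decide (x = idx)) := by
        apply List.countP_congr
        intro x _
        simp only [List.length_cons, decide_eq_true_eq]
        constructor
        · exact fun h => h.1
        · intro h; exact ⟨h, by push_cast; omega⟩
      have hcongr2 : tup.countP (fun x => decide (idx + 1 ≤ x ∧ x < idx + ((ch :: cs).length : Int)))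
          = tup.countP (fun j => decide (idx + 1 ≤ j ∧ j < idx + 1 + (cs.length : Int))) := by
        apply List.countP_congr
        intro x _
        simp only [List.length_cons, decide_eq_true_eq]
        constructor
        · intro h; exact ⟨h.1, by push_cast at h ⊢; omega⟩
        · intro h; exact ⟨h.1, by push_cast at h ⊢; omega⟩
      rw [maddMm]
      by_cases h : tup.contains idx = true
      · rw [if_pos h]
        rw [ih (idx+1) (m+1)]
        rw [hsplit, hcongr, hcongr2, countP_eq_singleton idx tup hnd,
          if_pos (by simpa using h)]
        omega
      · rw [if_neg h]
        rw [ih (idx+1) m]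
        rw [hsplit, hcongr, hcongr2, countP_eq_singleton idx tup hnd,
          if_neg (by simpa using h)]
        omega

theorem countP_rank (tup : List Int) (hs : tup.Pairwise (· < ·)) (r : Nat)
    (hr : r < tup.length) :
    tup.countP (fun j => decide (j < tup[r])) = r := by
  generalize hx : tup[r] = x
  have hdecomp : tup = tup.take r ++ x :: tup.drop (r + 1) := by
    conv_lhs => rw [← List.take_append_drop r tup]
    congr 1
    rw [List.drop_eq_getElem_cons hr, hx]
  conv_lhs => rw [hdecomp]
  rw [List.countP_append, List.countP_cons]
  have hlen : (tup.take r).length = r := by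
    rw [List.length_take]; omega
  have hall : (tup.take r).countP (fun j => decide (j < x)) = (tup.take r).length := by
    apply List.countP_eq_length.mpr
    intro j hj
    obtain ⟨q, hq, hget⟩ := List.mem_iff_getElem.1 hj
    have hqr : q < r := by
      rw [List.length_take] at hq; omega
    rw [List.getElem_take] at hget
    have hlt := List.pairwise_iff_getElem.1 hs q r (by omega) hr (by omega)
    rw [hx] at hlt
    rw [hget] at hlt
    simpa using hlt
  have h2 : (tup.drop (r+1)).countP (fun j => decide (j < x)) = 0 := by
    apply List.countP_eq_zero.mpr
    intro j hj
    obtain ⟨q, hq, hget⟩ := List.mem_iff_getElem.1 hj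
    rw [List.length_drop] at hq
    have hlt := List.pairwise_iff_getElem.1 hs r (r + 1 + q) hr (by omega) (by omega)
    rw [hx] at hlt
    rw [List.getElem_drop] at hget
    rw [hget] at hlt
    simp only [decide_eq_true_eq]
    omega
  rw [hall, hlen, h2]
  simp

-- assembled facts about the placeholder string mmbc = buildMm tup s 0 0
theorem mmbc_length (s : List Char) (tup : List Int) (hnd : tup.Nodup)
    (hlen : tup.length ≤ 10) :
    (buildMm tup s 0 0).length = s.length := by
  apply build_length tup s 0 0 le_rfl
  rw [madd_eq_countP tup hnd]
  have : tup.countP (fun j => decide (0 ≤ j ∧ j < 0 + (s.length : Int))) ≤ tup.length :=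
    List.countP_le_length
  omega

theorem madd_total_le (s : List Char) (tup : List Int) (hnd : tup.Nodup)
    (hlen : tup.length ≤ 10) : maddMm tup s 0 0 ≤ 10 := by
  rw [madd_eq_countP tup hnd]
  have : tup.countP (fun j => decide (0 ≤ j ∧ j < 0 + (s.length : Int))) ≤ tup.length :=
    List.countP_le_length
  omega

theorem mmbc_off (s : List Char) (tup : List Int) (hnd : tup.Nodup)
    (hlen : tup.length ≤ 10) (p : Nat) (hp : p < s.length) (hnot : (p : Int) ∉ tup) :
    (buildMm tup s 0 0).getD p ' ' = s.getD p ' ' := by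
  apply build_getD_off tup s 0 0 p le_rfl (madd_total_le s tup hnd hlen) hp
  simpa using hnot

theorem mmbc_on (s : List Char) (tup : List Int) (hsorted : tup.Pairwise (· < ·))
    (hmem : ∀ j ∈ tup, 0 ≤ j ∧ j < (s.length : Int)) (hlen : tup.length ≤ 10)
    (r : Nat) (hr : r < tup.length) :
    (buildMm tup s 0 0).getD (tup[r]).toNat ' ' = digitC r := by
  have hnd : tup.Nodup := hsorted.imp ne_of_lt
  have hjmem : tup[r] ∈ tup := List.getElem_mem hr
  obtain ⟨hj0, hjlt⟩ := hmem _ hjmem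
  have hcast : ((tup[r].toNat : Int)) = tup[r] := Int.toNat_of_nonneg hj0
  have hplt : tup[r].toNat < s.length := by omega
  rw [build_getD_on tup s 0 0 (tup[r]).toNat le_rfl (madd_total_le s tup hnd hlen) hplt
    (by rw [zero_add, hcast]; exact hjmem)]
  congr 1
  rw [madd_eq_countP tup hnd]
  have : tup.countP (fun j => decide (0 ≤ j ∧ j < 0 + ((s.take tup[r].toNat).length : Int)))
      = tup.countP (fun j => decide (j < tup[r])) := by
    apply List.countP_congr
    intro x hx
    obtain ⟨hx0, _⟩ := hmem x hx
    simp only [List.length_take, decide_eq_true_eq]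
    omega
  rw [this, countP_rank tup hsorted r hr]
  omega


-- ---- facts about the nucleotide tables ----
theorem mmdic_eq_alts : pyMmdic = pyAlts := by rfl

theorem alts_spec : ∀ c ∈ NTS, ∀ c' ∈ pyMmdic.getD c [], c' ∈ NTS := by
  intro c hc c' hc'
  simp only [NTS, List.mem_cons, List.not_mem_nil, or_false] at hc
  rcases hc with rfl | rfl | rfl | rfl
  · rw [(rfl : pyMmdic.getD 'A' [] = ['T','G','C'])] at hc'
    fin_cases hc' <;> simp [NTS]
  · rw [(rfl : pyMmdic.getD 'T' [] = ['A','G','C'])] at hc'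
    fin_cases hc' <;> simp [NTS]
  · rw [(rfl : pyMmdic.getD 'G' [] = ['A','T','C'])] at hc'
    fin_cases hc' <;> simp [NTS]
  · rw [(rfl : pyMmdic.getD 'C' [] = ['A','T','G'])] at hc'
    fin_cases hc' <;> simp [NTS]

-- ---- the common variant-enumeration spec ----
def Aexp (s : List Char) : List Int → List Char → List (List Char)
  | [], t => [t]
  | j :: rest, t =>
      (pyAlts.getD ((PySem.List.pyGet? s j).getD ' ') []).flatMap
        (fun c => Aexp s rest (PySem.List.pySetD t j c))

theorem Aexp_congr (s : List Char) :
    ∀ (tup : List Int) (t1 t2 : List Char), t1.length = t2.length →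
    (∀ j ∈ tup, 0 ≤ j ∧ j < (t1.length : Int)) →
    (∀ p : Nat, p < t1.length → (p : Int) ∉ tup → t1.getD p ' ' = t2.getD p ' ') →
    Aexp s tup t1 = Aexp s tup t2 := by
  intro tup
  induction tup with
  | nil =>
      intro t1 t2 hlen _ hoff
      have : t1 = t2 := by
        apply List.ext_getElem hlen
        intro p hp1 hp2
        have := hoff p hp1 (by simp)
        rwa [List.getD_eq_getElem t1 ' ' hp1, List.getD_eq_getElem t2 ' ' hp2] at this
      rw [this]
  | cons j rest ih =>
      intro t1 t2 hlen hb hoff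
      obtain ⟨hj0, hjlt⟩ := hb j List.mem_cons_self
      rw [Aexp, Aexp]
      apply List.flatMap_congr ?_
      intro c _
      apply ih
      · rw [PySem.List.length_pySetD, PySem.List.length_pySetD, hlen]
      · intro j' hj'
        rw [PySem.List.length_pySetD]
        exact hb j' (List.mem_cons_of_mem _ hj')
      · intro p hp hpn
        rw [PySem.List.length_pySetD] at hp
        rw [PySem.List.pySetD_of_nonneg t1 c hj0, PySem.List.pySetD_of_nonneg t2 c hj0]
        by_cases hpj : p = j.toNat
        · subst hpj
          rw [List.getD_eq_getElem _ ' ' (by simpa using hp),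
            List.getD_eq_getElem _ ' ' (by simp only [List.length_set]; omega)]
          rw [List.getElem_set_self, List.getElem_set_self]
        · rw [List.getD_eq_getElem _ ' ' (by simpa using hp),
            List.getD_eq_getElem _ ' ' (by simp only [List.length_set]; omega)]
          rw [List.getElem_set_ne (by omega), List.getElem_set_ne (by omega)]
          have := hoff p hp (by
            intro hmem
            rcases List.mem_cons.1 hmem with h | h
            · apply hpj; omega
            · exact hpn h)
          rwa [List.getD_eq_getElem t1 ' ' hp, List.getD_eq_getElem t2 ' ' (by omega)] at this
  
-- ---- B's product enumeration equals the spec ----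
theorem prod_spec (s : List Char) :
    ∀ (combo : List Int) (t : List Char),
    (pyProduct (combo.map (fun j => pyAlts.getD ((PySem.List.pyGet? s j).getD ' ') []))).map
        (fun choice => (combo.zip choice).foldl (fun v p => PySem.List.pySetD v p.1 p.2) t)
      = Aexp s combo t := by
  intro combo
  induction combo with
  | nil => intro t; simp [pyProduct, Aexp]
  | cons j rest ih =>
      intro t
      rw [List.map_cons, pyProduct, Aexp, List.map_flatMap]
      apply List.flatMap_congr ?_
      intro c _
      rw [List.map_map]
      rw [← ih (PySem.List.pySetD t j c)]
      apply List.map_congr_left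
      intro choice _
      simp [List.zip]

-- ---- the invariant carried through A's replace cascade ----
def GoodFrom (s u : List Char) (k : Int) (suffix : List Int) : Prop :=
  u.length = s.length ∧
  (∀ r : Nat, r < suffix.length → u.getD (suffix.getD r 0).toNat ' ' = digitC (k + r)) ∧
  (∀ p : Nat, p < u.length → (p : Int) ∉ suffix → u.getD p ' ' ∈ NTS)

theorem foldl_insKeys_flatMap {α : Type} (v : List Char) (g : α → List (List Char)) :
    ∀ (L : List α) (d : CDict),
    L.foldl (fun d a => insKeys d v (g a)) d = insKeys d v (L.flatMap g) := by
  intro L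
  induction L with
  | nil => intro d; rfl
  | cons a L ih =>
      intro d
      rw [List.foldl_cons, ih, List.flatMap_cons, insKeys_append]

theorem chain_insKeys (s : List Char) (hATGC : ∀ c ∈ s, c ∈ NTS) :
    ∀ (suffix : List Int) (k : Int) (d : CDict) (fd : CDict),
    0 ≤ k → k + suffix.length ≤ 10 → suffix.Nodup →
    (∀ j ∈ suffix, 0 ≤ j ∧ j < (s.length : Int)) →
    (∀ u ∈ d.keys, GoodFrom s u k suffix) →
    AllVal fd s →
    insKeys fd s ((PySem.List.enumerate suffix k).foldl
        (fun d p => changeMmNumToNt p.1 p.2 d s pyMmdic) d).keys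
      = insKeys fd s (d.keys.flatMap (Aexp s suffix)) := by
  intro suffix
  induction suffix with
  | nil =>
      intro k d fd _ _ _ _ _ _
      simp [PySem.List.enumerate, Aexp]
  | cons j rest ih =>
      intro k d fd hk0 hk10 hnd hbnd hgood hfd
      obtain ⟨hj0, hjlt⟩ := hbnd j List.mem_cons_self
      rw [PySem.List.enumerate_cons, List.foldl_cons]
      -- the single step
      have hschar : (PySem.List.pyGet? s j).getD ' ' = s.getD j.toNat ' ' := by
        have : j = ((j.toNat : Nat) : Int) := by omega
        rw [this, PySem.List.pyGet?_natCast]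
        rw [List.getElem?_eq_getElem (by omega), List.getD_eq_getElem _ _ (by omega)]
        rfl
      have hsmem : s.getD j.toNat ' ' ∈ NTS := by
        rw [List.getD_eq_getElem _ _ (by omega)]
        exact hATGC _ (List.getElem_mem _)
      have hstep : changeMmNumToNt k j d s pyMmdic
          = insKeys PySem.Dict.empty s
              (d.keys.flatMap (fun u =>
                (pyAlts.getD ((PySem.List.pyGet? s j).getD ' ') []).map
                  (fun c => PySem.List.pySetD u j c))) := by
        rw [changeMmNumToNt]
        rw [mmdic_eq_alts]
        have hinner : ∀ (nd : CDict) (u : List Char),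
            (pyAlts.getD ((PySem.List.pyGet? s j).getD ' ') []).foldl
              (fun nd c => nd.insert (PySem.Chars.replace u (PySem.Int.toStr k).toList [c]) s) nd
            = insKeys nd s ((pyAlts.getD ((PySem.List.pyGet? s j).getD ' ') []).map
                (fun c => PySem.Chars.replace u (PySem.Int.toStr k).toList [c])) := by
          intro nd u
          rw [insKeys, List.foldl_map]
        calc d.keys.foldl
              (fun nd u => (pyAlts.getD ((PySem.List.pyGet? s j).getD ' ') []).foldl
                (fun nd c => nd.insert (PySem.Chars.replace u (PySem.Int.toStr k).toList [c]) s) nd)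
              PySem.Dict.empty
            = d.keys.foldl (fun nd u => insKeys nd s
                ((pyAlts.getD ((PySem.List.pyGet? s j).getD ' ') []).map
                  (fun c => PySem.Chars.replace u (PySem.Int.toStr k).toList [c])))
                PySem.Dict.empty := by
              apply PySem.List.foldl_congr_mem
              intro nd u _
              exact hinner nd u
          _ = insKeys PySem.Dict.empty s (d.keys.flatMap (fun u =>
                (pyAlts.getD ((PySem.List.pyGet? s j).getD ' ') []).map
                  (fun c => PySem.Chars.replace u (PySem.Int.toStr k).toList [c]))) := by
              rw [foldl_insKeys_flatMap]
          _ = insKeys PySem.Dict.empty s (d.keys.flatMap (fun u =>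
                (pyAlts.getD ((PySem.List.pyGet? s j).getD ' ') []).map
                  (fun c => PySem.List.pySetD u j c))) := by
              congr 1
              apply List.flatMap_congr
              intro u hu
              apply List.map_congr_left
              intro c _
              obtain ⟨hlen, hdig, hnts⟩ := hgood u hu
              have hk9 : k ≤ 9 := by
                have h10 := hk10
                simp only [List.length_cons] at h10
                push_cast at h10
                omega
              rw [toStr_digit k hk0 hk9]
              have hup : u.getD j.toNat ' ' = digitC k := by
                have h0 := hdig 0 (by simp)
                simpa using h0
              rw [replace_single u (digitC k) c j.toNat (by omega) hup ?_]
              · rw [PySem.List.pySetD_of_nonneg u c hj0]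
              · intro q hq hqne
                by_cases hmem : (q : Int) ∈ (j :: rest)
                · rcases List.mem_cons.1 hmem with h | h
                  · exfalso; apply hqne; omega
                  · obtain ⟨r, hr, hrq⟩ := List.mem_iff_getElem.1 h
                    have hq' : u.getD q ' ' = digitC (k + (r + 1)) := by
                      have := hdig (r + 1) (by simp; omega)
                      have e1 : ((j :: rest).getD (r+1) 0) = rest[r] := by
                        rw [List.getD_cons_succ, List.getD_eq_getElem _ _ hr]
                      rw [e1, hrq] at this
                      have e2 : ((q : Int)).toNat = q := by omega
                      rwa [e2] at this
                    rw [hq']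
                    intro hcon
                    have hb1 : (0 : Int) ≤ k + ((r + 1 : Nat) : Int) ∧
                        k + ((r + 1 : Nat) : Int) ≤ 9 := by
                      have h10 := hk10
                      simp only [List.length_cons] at h10
                      push_cast at h10 ⊢
                      omega
                    have := digitC_inj hb1.1 hb1.2 hk0 hk9 hcon
                    omega
                · have := hnts q (by omega) hmem
                  intro hcon
                  rw [hcon] at this
                  exact digitC_not_NTS hk0 hk9 this
      rw [hstep]
      -- keys of the step result
      have hkeys : (insKeys PySem.Dict.empty s
          (d.keys.flatMap (fun u =>
            (pyAlts.getD ((PySem.List.pyGet? s j).getD ' ') []).map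
              (fun c => PySem.List.pySetD u j c)))).keys
          = PySem.Set.update [] (d.keys.flatMap (fun u =>
            (pyAlts.getD ((PySem.List.pyGet? s j).getD ' ') []).map
              (fun c => PySem.List.pySetD u j c))) := by
        rw [keys_insKeys]
        rfl
      have hgood' : ∀ u' ∈ (insKeys PySem.Dict.empty s
          (d.keys.flatMap (fun u =>
            (pyAlts.getD ((PySem.List.pyGet? s j).getD ' ') []).map
              (fun c => PySem.List.pySetD u j c)))).keys, GoodFrom s u' (k + 1) rest := by
        intro u' hu'
        rw [hkeys] at hu'
        have hu'' : u' ∈ d.keys.flatMap (fun u =>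
            (pyAlts.getD ((PySem.List.pyGet? s j).getD ' ') []).map
              (fun c => PySem.List.pySetD u j c)) := by
          have := (PySem.Set.mem_update [] _ u').1 hu'
          simpa using this
        obtain ⟨u, hu, hmem2⟩ := List.mem_flatMap.1 hu''
        obtain ⟨c, hc, rfl⟩ := List.mem_map.1 hmem2
        obtain ⟨hlen, hdig, hnts⟩ := hgood u hu
        have hcNTS : c ∈ NTS := by
          rw [hschar, ← mmdic_eq_alts] at hc
          exact alts_spec _ hsmem _ hc
        rw [PySem.List.pySetD_of_nonneg u c hj0]
        refine ⟨by rw [List.length_set]; exact hlen, ?_, ?_⟩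
        · intro r hr
          have hrmem : rest[r] ∈ rest := List.getElem_mem hr
          obtain ⟨hr0, hrlt⟩ := hbnd rest[r] (List.mem_cons_of_mem _ hrmem)
          have hne : (rest.getD r 0).toNat ≠ j.toNat := by
            rw [List.getD_eq_getElem _ _ hr]
            have : rest[r] ≠ j := by
              intro hcon
              have : j ∈ rest := hcon ▸ hrmem
              exact (List.nodup_cons.1 hnd).1 this
            omega
          have e3 : (u.set j.toNat c).getD (rest.getD r 0).toNat ' '
              = u.getD (rest.getD r 0).toNat ' ' := by
            by_cases hin : (rest.getD r 0).toNat < u.length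
            · rw [List.getD_eq_getElem _ _ (by simpa using hin),
                List.getD_eq_getElem _ _ hin, List.getElem_set_ne (by omega)]
            · rw [List.getD_eq_default _ _ (by simpa using hin),
                List.getD_eq_default _ _ (by omega)]
          rw [e3]
          have := hdig (r + 1) (by simp; omega)
          rw [List.getD_cons_succ] at this
          rw [this]
          congr 1
          push_cast
          ring
        · intro p hp hpnot
          rw [List.length_set] at hp
          by_cases hpj : p = j.toNat
          · subst hpj
            rw [List.getD_eq_getElem _ _ (by simpa using hp), List.getElem_set_self]
            exact hcNTS
          · rw [List.getD_eq_getElem _ _ (by simpa using hp), List.getElem_set_ne (by omega),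
              ← List.getD_eq_getElem _ ' ' hp]
            apply hnts p hp
            intro hmem3
            rcases List.mem_cons.1 hmem3 with h | h
            · apply hpj; omega
            · exact hpnot h
      -- apply the induction hypothesis and drop the dedup
      rw [ih (k + 1) _ fd (by omega) (by simp at hk10 ⊢; omega)
        (List.nodup_cons.1 hnd).2 (fun j' hj' => hbnd j' (List.mem_cons_of_mem _ hj'))
        hgood' hfd]
      rw [hkeys]
      rw [insKeys_update_flatMap s (Aexp s rest)
        (d.keys.flatMap (fun u =>
          (pyAlts.getD ((PySem.List.pyGet? s j).getD ' ') []).map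
            (fun c => PySem.List.pySetD u j c))) [] fd hfd]
      rw [List.nil_append]
      congr 1
      rw [List.flatMap_assoc]
      apply List.flatMap_congr
      intro u _
      rw [List.flatMap_map]
      rfl



-- ---- itertools.combinations facts ----
theorem combos_sublist {α : Type} :
    ∀ (xs : List α) (r : Nat) (tup : List α),
    tup ∈ PySem.List.combinations xs r → tup.Sublist xs := by
  intro xs
  induction xs with
  | nil =>
      intro r tup h
      cases r with
      | zero =>
          rw [PySem.List.combinations_zero] at h
          simp at h
          subst h
          exact List.Sublist.refl _
      | succ r =>
          rw [PySem.List.combinations_nil_succ] at h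
          cases h
  | cons x xs ih =>
      intro r tup h
      cases r with
      | zero =>
          rw [PySem.List.combinations_zero] at h
          simp at h
          subst h
          exact List.nil_sublist _
      | succ r =>
          rw [PySem.List.combinations_cons_succ] at h
          rcases List.mem_append.1 h with h | h
          · obtain ⟨c, hc, rfl⟩ := List.mem_map.1 h
            exact List.Sublist.cons₂ x (ih r c hc)
          · exact List.Sublist.cons x (ih (r+1) tup h)

theorem combos_length {α : Type} :
    ∀ (xs : List α) (r : Nat) (tup : List α),
    tup ∈ PySem.List.combinations xs r → tup.length = r := by
  intro xs
  induction xs with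
  | nil =>
      intro r tup h
      cases r with
      | zero =>
          rw [PySem.List.combinations_zero] at h
          simp at h
          subst h
          rfl
      | succ r =>
          rw [PySem.List.combinations_nil_succ] at h
          cases h
  | cons x xs ih =>
      intro r tup h
      cases r with
      | zero =>
          rw [PySem.List.combinations_zero] at h
          simp at h
          subst h
          rfl
      | succ r =>
          rw [PySem.List.combinations_cons_succ] at h
          rcases List.mem_append.1 h with h | h
          · obtain ⟨c, hc, rfl⟩ := List.mem_map.1 h
            simp [ih r c hc]
          · exact ih (r+1) tup h

theorem pyRange_len_sorted (L : Nat) :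
    (PySem.List.pyRange 0 (L : Int)).Pairwise (· < ·) := by
  rw [PySem.List.pyRange_zero_natCast]
  exact List.pairwise_lt_range.map _ (fun a b hab => Int.ofNat_lt.2 hab)

theorem pyRange_len_length (L : Nat) :
    (PySem.List.pyRange 0 (L : Int)).length = L := by
  rw [PySem.List.pyRange_zero_natCast, List.length_map, List.length_range]

-- ---- the per-i enumeration both sides produce ----
def Wfun (s : List Char) (i : Int) : List (List Char) :=
  (PySem.List.combinations (PySem.List.pyRange 0 (s.length : Int)) i.toNat).flatMap
    (fun tup => Aexp s tup s)

theorem foldl_congr_allval {α : Type} (s : List Char) (F G : CDict → α → CDict)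
    (hpres : ∀ m a, AllVal m s → AllVal (G m a) s) :
    ∀ (L : List α) (m : CDict), (∀ m' a, AllVal m' s → a ∈ L → F m' a = G m' a) →
    AllVal m s → L.foldl F m = L.foldl G m := by
  intro L
  induction L with
  | nil => intro m _ _; rfl
  | cons a L ih =>
      intro m h hm
      rw [List.foldl_cons, List.foldl_cons, h m a hm List.mem_cons_self]
      exact ih (G m a) (fun m' b hmv hb => h m' b hmv (List.mem_cons_of_mem _ hb))
        (hpres m a hm)

theorem allVal_empty_insert (k : List Char) : AllVal (PySem.Dict.empty.insert k k) k := by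
  intro p hp
  have : (PySem.Dict.empty.insert k k).items = [(k, k)] := rfl
  rw [this] at hp
  simp at hp
  rw [hp]

theorem contains_empty_insert (k : List Char) :
    (PySem.Dict.empty.insert k k).contains k = true := by
  rw [PySem.Dict.contains_insert]
  simp

-- A's _generate_mm_bc, for 1 ≤ i, as one batch of insertions
theorem generate_eq (s : List Char) (hATGC : ∀ c ∈ s, c ∈ NTS) (i : Int) (hi : 1 ≤ i)
    (hB : i ≤ 10 ∨ s.length ≤ 10) :
    generateMmBc s i = insKeys (PySem.Dict.empty.insert s s) s (Wfun s i) := by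
  rw [generateMmBc]
  have hmain :
      (PySem.List.combinations (PySem.List.pyRange 0 (s.length : Int)) i.toNat).foldl
        (fun final_dic tup =>
          ((PySem.List.enumerate tup).foldl
              (fun d p => changeMmNumToNt p.1 p.2 d s pyMmdic)
              (PySem.Dict.empty.insert
                ((PySem.List.enumerate s).foldl
                  (fun (st : List Char × Int) p =>
                    if tup.contains p.1 then (st.1 ++ (PySem.Int.toStr st.2).toList, st.2 + 1)
                    else (st.1 ++ [p.2], st.2))
                  (([] : List Char), (0 : Int))).1 ['1'])).keys.foldl
            (fun fd k => fd.insert k s) final_dic)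
        (PySem.Dict.empty.insert s s)
      = insKeys (PySem.Dict.empty.insert s s) s (Wfun s i) := by
    rw [foldl_congr_allval s _
      (fun fd tup => insKeys fd s (Aexp s tup s)) (fun m tup hm => allVal_insKeys hm _)
      _ _ ?_ (allVal_empty_insert s)]
    · rw [Wfun, foldl_insKeys_flatMap]
    · intro fd tup hfd htup
      have hsub := combos_sublist _ _ _ htup
      have hlen := combos_length _ _ _ htup
      have hsorted : tup.Pairwise (· < ·) := (pyRange_len_sorted s.length).sublist hsub
      have hnd : tup.Nodup := hsorted.imp ne_of_lt
      have hbnd : ∀ j ∈ tup, 0 ≤ j ∧ j < (s.length : Int) := by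
        intro j hj
        have := PySem.List.mem_pyRange_one.1 (hsub.subset hj)
        omega
      have h10 : tup.length ≤ 10 := by
        rcases hB with h | h
        · rw [hlen]; omega
        · have := hsub.length_le
          rw [pyRange_len_length] at this
          omega
      have hmmbc : ((PySem.List.enumerate s).foldl
          (fun (st : List Char × Int) p =>
            if tup.contains p.1 then (st.1 ++ (PySem.Int.toStr st.2).toList, st.2 + 1)
            else (st.1 ++ [p.2], st.2))
          (([] : List Char), (0 : Int))).1 = buildMm tup s 0 0 := by
        rw [fold_eq_build tup s 0 [] 0]
        simp
      rw [hmmbc]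
      have hkeys0 : (PySem.Dict.empty.insert (buildMm tup s 0 0) ['1']).keys
          = [buildMm tup s 0 0] := rfl
      have hgood : ∀ u ∈ (PySem.Dict.empty.insert (buildMm tup s 0 0) ['1']).keys,
          GoodFrom s u 0 tup := by
        rw [hkeys0]
        intro u hu
        rw [List.mem_singleton] at hu
        subst hu
        refine ⟨mmbc_length s tup hnd h10, ?_, ?_⟩
        · intro r hr
          have := mmbc_on s tup hsorted hbnd h10 r hr
          rw [List.getD_eq_getElem tup 0 hr, show (0 : Int) + (r : Int) = (r : Int) by ring]
          exact this
        · intro p hp hpn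
          rw [mmbc_length s tup hnd h10] at hp
          rw [mmbc_off s tup hnd h10 p hp hpn]
          rw [List.getD_eq_getElem s ' ' hp]
          exact hATGC _ (List.getElem_mem _)
      have hchain := chain_insKeys s hATGC tup 0
        (PySem.Dict.empty.insert (buildMm tup s 0 0) ['1']) fd le_rfl
        (by rw [hlen]; omega) hnd hbnd hgood hfd
      show insKeys fd s _ = _
      rw [hchain, hkeys0]
      rw [List.flatMap_cons, List.flatMap_nil, List.append_nil]
      congr 1
      apply Aexp_congr s tup _ _ (mmbc_length s tup hnd h10)
      · intro j hj
        rw [mmbc_length s tup hnd h10]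
        exact hbnd j hj
      · intro p hp hpn
        rw [mmbc_length s tup hnd h10] at hp
        exact mmbc_off s tup hnd h10 p hp hpn
  exact hmain

-- B's inner double loop over one i
theorem bstep_eq (s : List Char) (i : Int) (out : CDict) :
    (PySem.List.combinations (PySem.List.pyRange 0 (s.length : Int)) i.toNat).foldl
      (fun out combo =>
        (pyProduct (combo.map (fun j => pyAlts.getD ((PySem.List.pyGet? s j).getD ' ') []))).foldl
          (fun out choice =>
            out.insert ((combo.zip choice).foldl
              (fun v p => PySem.List.pySetD v p.1 p.2) s) s)
          out)
      out
    = insKeys out s (Wfun s i) := by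
  have hstep : ∀ (out : CDict) (combo : List Int),
      (pyProduct (combo.map (fun j => pyAlts.getD ((PySem.List.pyGet? s j).getD ' ') []))).foldl
        (fun out choice =>
          out.insert ((combo.zip choice).foldl
            (fun v p => PySem.List.pySetD v p.1 p.2) s) s)
        out
      = insKeys out s (Aexp s combo s) := by
    intro out combo
    rw [← prod_spec s combo s, insKeys, List.foldl_map]
  rw [PySem.List.foldl_congr_mem _ _
    (fun out combo => insKeys out s (Aexp s combo s)) _ (fun out combo _ => hstep out combo)]
  rw [Wfun, foldl_insKeys_flatMap]

-- the merged fold, once [sb] is already present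
theorem merged_eq (s : List Char) (hATGC : ∀ c ∈ s, c ∈ NTS) :
    ∀ (is : List Int) (m : CDict), AllVal m s → m.contains s = true →
    (∀ i ∈ is, 1 ≤ i ∧ (i ≤ 10 ∨ s.length ≤ 10)) →
    is.foldl (fun merged i =>
        ((generateMmBc s i).keys).foldl (fun m k => m.insert k s) merged) m
      = is.foldl (fun out i => insKeys out s (Wfun s i)) m := by
  intro is
  induction is with
  | nil => intro m _ _ _; rfl
  | cons i is ih =>
      intro m hm hc hcond
      obtain ⟨hi1, hi10⟩ := hcond i List.mem_cons_self
      rw [List.foldl_cons, List.foldl_cons]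
      have hA : ((generateMmBc s i).keys).foldl (fun m k => m.insert k s) m
          = insKeys m s (Wfun s i) := by
        show insKeys m s ((generateMmBc s i).keys) = _
        rw [generate_eq s hATGC i hi1 hi10, keys_insKeys]
        have hks : (PySem.Dict.empty.insert s s).keys = [s] := rfl
        rw [hks, insKeys_update s (Wfun s i) [s] m hm]
        rw [show ([s] ++ Wfun s i) = s :: Wfun s i from rfl]
        show insKeys (m.insert s s) s (Wfun s i) = _
        rw [insert_self hm hc]
      rw [hA]
      exact ih _ (allVal_insKeys hm _) (contains_insKeys_mono s _ hc)
        (fun i' hi' => hcond i' (List.mem_cons_of_mem _ hi'))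

theorem pyRange_nil_of_le {a b : Int} (h : b ≤ a) : PySem.List.pyRange a b = [] := by
  apply List.eq_nil_iff_forall_not_mem.2
  intro x hx
  have := PySem.List.mem_pyRange_one.1 hx
  omega

-- ===== VERDICT (by name: the statement is the Claim_ definition above) =====
theorem n_mm_barcode_spec : Claim_equal_n_mm_barcode := by
  intro sb n hDom hPre
  obtain ⟨hP1, hP2⟩ := hPre
  show n_mm_barcode sb n = n_mm_barcode_alt sb n
  rcases lt_trichotomy n 0 with hneg | hzero | hpos
  · -- n < 0 : both give the empty dict
    have hr : PySem.List.pyRange 1 (n+1) = [] := pyRange_nil_of_le (by omega)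
    simp [n_mm_barcode, n_mm_barcode_alt, hr, (show ¬ n = 0 by omega),
      (show ¬ (0:Int) ≤ n by omega)]
  · -- n = 0 : both give {sb: sb}
    subst hzero
    simp [n_mm_barcode, n_mm_barcode_alt]
  · -- 1 ≤ n
    have hATGC : ∀ c ∈ sb.toList, c ∈ NTS := fun c hc => hP1 (by omega) c hc
    have hcond : ∀ i ∈ PySem.List.pyRange 1 (n+1), 1 ≤ i ∧ (i ≤ 10 ∨ sb.toList.length ≤ 10) := by
      intro i hi
      have hmi := PySem.List.mem_pyRange_one.1 hi
      refine ⟨by omega, ?_⟩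
      by_cases h11 : 11 ≤ n
      · right
        by_contra hlen
        exact hP2 ⟨h11, by omega⟩
      · left; omega
    have hrange : PySem.List.pyRange 1 (n+1) = 1 :: PySem.List.pyRange 2 (n+1) :=
      PySem.List.pyRange_one_cons (by omega)
    simp only [n_mm_barcode, n_mm_barcode_alt]
    rw [if_neg (by omega), if_pos (by omega)]
    congr 1
    -- rewrite B's inner loops
    rw [PySem.List.foldl_congr_mem _ _
      (fun out i => insKeys out sb.toList (Wfun sb.toList i)) _
      (fun out i _ => bstep_eq sb.toList i out)]
    -- rewrite A's fold, peeling the first iteration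
    rw [hrange, List.foldl_cons, List.foldl_cons]
    have hfirst :
        ((generateMmBc sb.toList 1).keys).foldl
          (fun m k => m.insert k sb.toList) PySem.Dict.empty
        = insKeys (PySem.Dict.empty.insert sb.toList sb.toList) sb.toList (Wfun sb.toList 1) := by
      show insKeys PySem.Dict.empty sb.toList ((generateMmBc sb.toList 1).keys) = _
      rw [generate_eq sb.toList hATGC 1 le_rfl (Or.inl (by omega)), keys_insKeys]
      have hks : (PySem.Dict.empty.insert sb.toList sb.toList).keys = [sb.toList] := rfl
      rw [hks, insKeys_update sb.toList (Wfun sb.toList 1) [sb.toList] PySem.Dict.empty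
        (fun p hp => by cases hp)]
      rfl
    rw [hfirst]
    exact congrArg PySem.Dict.items (merged_eq sb.toList hATGC (PySem.List.pyRange 2 (n+1)) _
      (allVal_insKeys (allVal_empty_insert sb.toList) _)
      (contains_insKeys_mono sb.toList _ (contains_empty_insert sb.toList))
      (fun i hi => hcond i (by rw [hrange]; exact List.mem_cons_of_mem _ hi)))
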